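-- pv_equiv track=rewrite | github.com/rishav-026/Guardian-Shield | backend/utils/analytics.py | risk_distribution
-- ===== SOURCE A (Python) =====
-- from typing import Any, Dict, List
--
-- def risk_distribution(transactions: List[Dict[str, Any]]) -> Dict[str, Any]:
--     dist = {"safe": 0, "caution": 0, "block": 0}
--     for t in transactions:
--         if t.get("decision") == "SAFE":
--             dist["safe"] += 1
--         elif t.get("decision") in {"CHALLENGE", "CAUTION"}:
--             dist["caution"] += 1
--         else:
--             dist["block"] += 1
--     return dist
-- ===== SOURCE B (Python) =====
-- from typing import Any, Dict, List
--
-- def risk_distribution(transactions: List[Dict[str, Any]]) -> Dict[str, Any]: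
--     # Staged passes: project the decision column once, then derive each bucket
--     # by an independent counting scan; block is the arithmetic remainder.
--     decisions = [t.get("decision") for t in transactions]
--     safe = decisions.count("SAFE")
--     caution = decisions.count("CHALLENGE") + decisions.count("CAUTION")
--     return {"safe": safe, "caution": caution, "block": len(decisions) - safe - caution}
-- ===== Notes on version B (the rewrite author's own statement) =====
-- stated objective: alternative
-- what changed: Replaces A's single pass with a branching if/elif/else accumulator by a staged pipeline: one projection of the decision column, then three independent list.count scans, with the block bucket computed as the arithmetic remainder len - safe - caution instead of ever being counted.
import Mathlib
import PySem

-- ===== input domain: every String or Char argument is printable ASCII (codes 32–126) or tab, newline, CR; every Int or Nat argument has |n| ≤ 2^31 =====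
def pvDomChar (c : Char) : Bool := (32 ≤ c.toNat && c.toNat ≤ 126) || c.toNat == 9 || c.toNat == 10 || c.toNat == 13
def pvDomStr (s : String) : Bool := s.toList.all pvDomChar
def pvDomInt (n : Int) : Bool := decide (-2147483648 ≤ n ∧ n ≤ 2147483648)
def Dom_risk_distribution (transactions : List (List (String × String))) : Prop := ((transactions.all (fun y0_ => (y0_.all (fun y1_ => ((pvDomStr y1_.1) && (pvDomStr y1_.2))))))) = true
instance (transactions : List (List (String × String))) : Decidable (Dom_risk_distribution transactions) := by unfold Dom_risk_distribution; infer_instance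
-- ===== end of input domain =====

-- B replaces A's single branching-accumulator pass by a staged pipeline: project the
-- decision column once, count each target value by an independent scan, and compute
-- block as the arithmetic remainder; alternative decomposition, not faster.

-- ===== PORT A =====
def risk_distribution (transactions : List (List (String × String))) : List (String × Int) :=
  (transactions.foldl (fun (dist : PySem.Dict String Int) t =>
      if (PySem.Dict.mk t).get? "decision" = some "SAFE" then
        dist.modify "safe" 0 (· + 1)
      else if (PySem.Dict.mk t).get? "decision" = some "CHALLENGE" ∨
              (PySem.Dict.mk t).get? "decision" = some "CAUTION" then
        dist.modify "caution" 0 (· + 1)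
      else
        dist.modify "block" 0 (· + 1))
    (PySem.Dict.mk [("safe", 0), ("caution", 0), ("block", 0)])).items

-- ===== PORT B =====
def risk_distribution_alt (transactions : List (List (String × String))) : List (String × Int) :=
  let decisions := transactions.map (fun t => (PySem.Dict.mk t).get? "decision")
  let safe : Int := (PySem.List.count decisions (some "SAFE") : Int)
  let caution : Int := (PySem.List.count decisions (some "CHALLENGE") : Int)
      + (PySem.List.count decisions (some "CAUTION") : Int)
  [("safe", safe), ("caution", caution), ("block", (decisions.length : Int) - safe - caution)]

-- ===== PRECONDITION & SPEC =====
def Spec_risk_distribution (transactions : List (List (String × String))) (out : List (String × Int)) : Prop := out = risk_distribution_alt transactions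
instance (transactions : List (List (String × String))) (out : List (String × Int)) : Decidable (Spec_risk_distribution transactions out) := by unfold Spec_risk_distribution; infer_instance

-- ===== CLAIM (what is proved, stated in full; the proofs are below) =====
def Claim_equal_risk_distribution : Prop := ∀ (transactions : List (List (String × String))), Dom_risk_distribution transactions → Spec_risk_distribution transactions (risk_distribution transactions)

-- ===== LEMMAS AND PROOFS =====

-- the decision value Python's t.get("decision") extracts
def pvKey (t : List (String × String)) : Option String := (PySem.Dict.mk t).get? "decision"

-- counts of A's first two branches over a list, as integers
def pvS (L : List (List (String × String))) : Int := ((L.map pvKey).count (some "SAFE") : Int)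
def pvC (L : List (List (String × String))) : Int :=
  ((L.map pvKey).count (some "CHALLENGE") : Int) + ((L.map pvKey).count (some "CAUTION") : Int)

lemma pvS_cons (t : List (String × String)) (L : List (List (String × String))) :
    pvS (t :: L) = pvS L + (if pvKey t = some "SAFE" then 1 else 0) := by
  simp only [pvS, List.map_cons, List.count_cons]
  by_cases h : pvKey t = some "SAFE" <;> simp [h]

lemma pvC_cons (t : List (String × String)) (L : List (List (String × String))) :
    pvC (t :: L) = pvC L + (if pvKey t = some "CHALLENGE" then 1 else 0)
      + (if pvKey t = some "CAUTION" then 1 else 0) := by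
  simp only [pvC, List.map_cons, List.count_cons]
  by_cases h1 : pvKey t = some "CHALLENGE" <;> by_cases h2 : pvKey t = some "CAUTION" <;>
    simp [h1, h2] <;> omega

lemma pvModify_safe (s c b : Int) :
    (PySem.Dict.mk [("safe", s), ("caution", c), ("block", b)]).modify "safe" 0 (· + 1)
      = PySem.Dict.mk [("safe", s + 1), ("caution", c), ("block", b)] := by
  simp [PySem.Dict.modify, PySem.Dict.insert, PySem.Dict.getD, PySem.Dict.get?]

lemma pvModify_caution (s c b : Int) :
    (PySem.Dict.mk [("safe", s), ("caution", c), ("block", b)]).modify "caution" 0 (· + 1)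
      = PySem.Dict.mk [("safe", s), ("caution", c + 1), ("block", b)] := by
  simp [PySem.Dict.modify, PySem.Dict.insert, PySem.Dict.getD, PySem.Dict.get?]

lemma pvModify_block (s c b : Int) :
    (PySem.Dict.mk [("safe", s), ("caution", c), ("block", b)]).modify "block" 0 (· + 1)
      = PySem.Dict.mk [("safe", s), ("caution", c), ("block", b + 1)] := by
  simp [PySem.Dict.modify, PySem.Dict.insert, PySem.Dict.getD, PySem.Dict.get?]

lemma pvA_fold (L : List (List (String × String))) (s c b : Int) :
    (L.foldl (fun (dist : PySem.Dict String Int) t =>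
      if (PySem.Dict.mk t).get? "decision" = some "SAFE" then
        dist.modify "safe" 0 (· + 1)
      else if (PySem.Dict.mk t).get? "decision" = some "CHALLENGE" ∨
              (PySem.Dict.mk t).get? "decision" = some "CAUTION" then
        dist.modify "caution" 0 (· + 1)
      else
        dist.modify "block" 0 (· + 1))
      (PySem.Dict.mk [("safe", s), ("caution", c), ("block", b)]))
    = PySem.Dict.mk [("safe", s + pvS L), ("caution", c + pvC L),
        ("block", b + ((L.length : Int) - pvS L - pvC L))] := by
  induction L generalizing s c b with
  | nil => simp [pvS, pvC]
  | cons t L ih =>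
    rw [List.foldl_cons]
    by_cases h1 : pvKey t = some "SAFE"
    · rw [if_pos (by simpa [pvKey] using h1), pvModify_safe, ih,
        pvS_cons, pvC_cons]
      simp [h1]
      omega
    · by_cases h2 : pvKey t = some "CHALLENGE" ∨ pvKey t = some "CAUTION"
      · rw [if_neg (by simpa [pvKey] using h1), if_pos (by simpa [pvKey] using h2),
          pvModify_caution, ih, pvS_cons, pvC_cons]
        rcases h2 with h | h
        · simp [h]
          omega
        · simp [h]
          omega
      · push Not at h2
        rw [if_neg (by simpa [pvKey] using h1),
          if_neg (by simpa [pvKey] using h2), pvModify_block, ih, pvS_cons, pvC_cons]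
        simp [h1, h2.1, h2.2]
        omega

-- ===== VERDICT (by name: the statement is the Claim_ definition above) =====
theorem risk_distribution_spec : Claim_equal_risk_distribution := by
  intro L _
  show risk_distribution L = risk_distribution_alt L
  have halt : risk_distribution_alt L =
      [("safe", pvS L), ("caution", pvC L),
       ("block", (L.length : Int) - pvS L - pvC L)] := by
    unfold risk_distribution_alt pvS pvC pvKey
    simp [PySem.List.count_eq]
  rw [halt]
  unfold risk_distribution
  rw [pvA_fold]
  simp
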